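-- pv_equiv track=rewrite | github.com/aymanreda56/kh4017 | Lab 10/debug_this.py | replace_numbers_in_string
-- ===== SOURCE A (Python) =====
-- def replace_numbers_in_string (string:str):
--     all_numbers = ['1', '2', '3', '4', '5', '6', '7', '8', '9', '0']
--     new_string = ""
--     for i in range(len(string)):
--         if string[i] in all_numbers:
--             new_string += "NUM"
--         else:
--             new_string += string[i]
--     return new_string
-- ===== SOURCE B (Python) =====
-- import re
--
-- def replace_numbers_in_string(string: str):
--     return re.sub(r'[0-9]', 'NUM', string)
-- ===== Notes on version B (the rewrite author's own statement) =====
-- stated objective: idiomatic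
-- what changed: Replaces the per-index loop with digit-list membership and repeated string concatenation by a single regex substitution over an explicit ASCII digit class.
import Mathlib
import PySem

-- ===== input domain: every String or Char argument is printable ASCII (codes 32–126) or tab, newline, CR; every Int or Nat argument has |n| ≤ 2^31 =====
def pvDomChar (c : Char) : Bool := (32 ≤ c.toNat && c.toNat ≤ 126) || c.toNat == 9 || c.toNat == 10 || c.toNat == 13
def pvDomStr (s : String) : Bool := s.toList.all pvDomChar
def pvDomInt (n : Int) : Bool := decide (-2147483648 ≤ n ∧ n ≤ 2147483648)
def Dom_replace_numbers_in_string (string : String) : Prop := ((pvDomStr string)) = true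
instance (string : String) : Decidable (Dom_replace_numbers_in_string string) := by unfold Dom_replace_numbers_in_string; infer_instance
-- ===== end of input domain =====

-- B replaces A's index loop + digit-list membership by a single regex substitution (idiomatic).


-- ===== PORT A =====
-- literal port: the digit list, then 'for i in range(len(string))' appending "NUM" or string[i]
def replace_numbers_in_string (string : String) : String :=
  let all_numbers : List Char := ['1', '2', '3', '4', '5', '6', '7', '8', '9', '0']
  let cs := string.toList
  let new_string :=
    (PySem.List.pyRange 0 cs.length 1).foldl
      (fun ns i =>
        if PySem.List.pyGetD cs i ' ' ∈ all_numbers then ns ++ "NUM".toList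
        else ns ++ [PySem.List.pyGetD cs i ' ']) []
  String.ofList new_string

-- ===== PORT B =====
-- re.sub(r'[0-9]', 'NUM', string): the character class [0-9] replaces each ASCII digit by "NUM";
-- ported as one substitution pass over the characters (exact for this single-character pattern)
def replace_numbers_in_string_alt (string : String) : String :=
  String.ofList (string.toList.flatMap (fun c => if '0' ≤ c ∧ c ≤ '9' then "NUM".toList else [c]))

-- ===== PRECONDITION & SPEC =====
def Spec_replace_numbers_in_string (string : String) (out : String) : Prop := out = replace_numbers_in_string_alt string
instance (string : String) (out : String) : Decidable (Spec_replace_numbers_in_string string out) := by unfold Spec_replace_numbers_in_string; infer_instance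

-- ===== CLAIM (what is proved, stated in full; the proofs are below) =====
def Claim_equal_replace_numbers_in_string : Prop := ∀ (string : String), Dom_replace_numbers_in_string string → Spec_replace_numbers_in_string string (replace_numbers_in_string string)

-- ===== LEMMAS AND PROOFS =====

-- the two per-character tests agree
theorem pv_char_of_toNat (c : Char) (n : Nat) (h : c.toNat = n) : c = Char.ofNat n := by
  have : c = Char.ofNat c.toNat := (Char.ofNat_toNat c).symm
  rw [h] at this; exact this

theorem pv_digit_test (c : Char) :
    (c ∈ (['1', '2', '3', '4', '5', '6', '7', '8', '9', '0'] : List Char)) ↔ ('0' ≤ c ∧ c ≤ '9') := by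
  constructor
  · intro h; fin_cases h <;> exact ⟨by decide, by decide⟩
  · rintro ⟨h1, h2⟩
    have h1' : 48 ≤ c.toNat := h1
    have h2' : c.toNat ≤ 57 := h2
    have hv : c.toNat = 48 ∨ c.toNat = 49 ∨ c.toNat = 50 ∨ c.toNat = 51 ∨ c.toNat = 52 ∨
        c.toNat = 53 ∨ c.toNat = 54 ∨ c.toNat = 55 ∨ c.toNat = 56 ∨ c.toNat = 57 := by omega
    rcases hv with h|h|h|h|h|h|h|h|h|h <;> rw [pv_char_of_toNat c _ h] <;> decide

-- ===== VERDICT (by name: the statement is the Claim_ definition above) =====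
theorem replace_numbers_in_string_spec : Claim_equal_replace_numbers_in_string := by
  intro s _
  unfold Spec_replace_numbers_in_string replace_numbers_in_string replace_numbers_in_string_alt
  simp only []
  have hb :
      (PySem.List.pyRange 0 s.toList.length 1).foldl
        (fun ns i =>
          if PySem.List.pyGetD s.toList i ' ' ∈ (['1','2','3','4','5','6','7','8','9','0'] : List Char)
          then ns ++ "NUM".toList else ns ++ [PySem.List.pyGetD s.toList i ' ']) []
      = s.toList.flatMap (fun c => if '0' ≤ c ∧ c ≤ '9' then "NUM".toList else [c]) := by
    have hmap := PySem.List.map_pyGetD_pyRange_zero' (xs := s.toList) (d := ' ')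
    calc (PySem.List.pyRange 0 s.toList.length 1).foldl
          (fun ns i =>
            if PySem.List.pyGetD s.toList i ' ' ∈ (['1','2','3','4','5','6','7','8','9','0'] : List Char)
            then ns ++ "NUM".toList else ns ++ [PySem.List.pyGetD s.toList i ' ']) []
        = (PySem.List.pyRange 0 s.toList.length 1).foldl
          (fun ns i => ns ++ (if '0' ≤ PySem.List.pyGetD s.toList i ' ' ∧ PySem.List.pyGetD s.toList i ' ' ≤ '9'
            then "NUM".toList else [PySem.List.pyGetD s.toList i ' '])) [] := by
          apply PySem.List.foldl_congr_mem; intro ns i _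
          by_cases h : PySem.List.pyGetD s.toList i ' ' ∈ (['1','2','3','4','5','6','7','8','9','0'] : List Char)
          · rw [if_pos h, if_pos ((pv_digit_test _).mp h)]
          · rw [if_neg h, if_neg (fun hc => h ((pv_digit_test _).mpr hc))]
      _ = ((PySem.List.pyRange 0 s.toList.length 1).map (fun i => PySem.List.pyGetD s.toList i ' ')).foldl
          (fun ns c => ns ++ (if '0' ≤ c ∧ c ≤ '9' then "NUM".toList else [c])) [] := by
          rw [List.foldl_map]
      _ = s.toList.foldl (fun ns c => ns ++ (if '0' ≤ c ∧ c ≤ '9' then "NUM".toList else [c])) [] := by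
          rw [hmap]
      _ = s.toList.flatMap (fun c => if '0' ≤ c ∧ c ≤ '9' then "NUM".toList else [c]) := by
          rw [PySem.List.foldl_append_eq_flatMap]; simp
  rw [hb]
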